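-- pv_equiv track=rewrite | github.com/chyoan/Coding-Exercises | Python/w3resource/Python Basic/Programming Puzzles/rearrange_in_ascii_order.py | rearrange_order
-- ===== SOURCE A (Python) =====
-- def rearrange_order(string):
--     if ' ' in string:
--         string = string.split()
--         new_string = []
--         for word in string:
--             new_string.append(''.join(sorted(word)))
--         return ' '.join(new_string)
--     else:
--         return ''.join(sorted(string))
-- ===== SOURCE B (Python) =====
-- def rearrange_order(string):
--     def csort(word):
--         counts = [0] * 128
--         for ch in word:
--             counts[ord(ch)] += 1
--         return ''.join(chr(c) * counts[c] for c in range(128))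
--     if ' ' in string:
--         return ' '.join(csort(word) for word in string.split())
--     return csort(string)
-- ===== Notes on version B (the rewrite author's own statement) =====
-- stated objective: alternative
-- what changed: Replaces the per-word comparison sort (sorted()) with a counting sort over the 128-slot ASCII alphabet: one pass tallies character counts, then the output is emitted code by code.
import Mathlib
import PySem

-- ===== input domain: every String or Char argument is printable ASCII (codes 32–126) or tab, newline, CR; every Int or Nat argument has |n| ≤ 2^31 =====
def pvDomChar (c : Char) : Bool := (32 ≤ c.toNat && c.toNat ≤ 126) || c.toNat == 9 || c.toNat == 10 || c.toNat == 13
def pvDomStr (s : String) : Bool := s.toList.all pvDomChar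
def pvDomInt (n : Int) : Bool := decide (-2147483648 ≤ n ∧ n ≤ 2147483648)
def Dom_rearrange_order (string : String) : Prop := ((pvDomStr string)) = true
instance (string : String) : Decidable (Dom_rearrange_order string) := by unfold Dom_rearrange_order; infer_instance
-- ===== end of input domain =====

-- B replaces the per-word comparison sort with a counting sort over the 128-slot ASCII alphabet
-- (one tallying pass per word, then emit each code's characters in increasing code order).

-- ===== PORT A =====
def rearrange_order (string : String) : String :=
  if PySem.Str.isIn " " string then
    let words := PySem.Str.split₀ string
    let new_string := words.foldl
      (fun acc word => acc ++ [String.ofList (PySem.List.sorted word.toList (fun c => c))])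
      ([] : List String)
    PySem.Str.join " " new_string
  else
    String.ofList (PySem.List.sorted string.toList (fun c => c))

-- ===== PORT B =====
-- counting sort of one word: counts[ord(ch)] += 1, then chr(c) * counts[c] for c in range(128).
-- Python's list indexing counts[i] is ported as List.getD i 0 / List.set: exact for i < 128, i.e. on Dom's chars.
def pvCsort (word : List Char) : List Char :=
  let counts := word.foldl
    (fun cnts ch => cnts.set ch.toNat (cnts.getD ch.toNat 0 + 1))
    (List.replicate 128 0)
  (List.range 128).flatMap (fun c => List.replicate (counts.getD c 0) (Char.ofNat c))

def rearrange_order_alt (string : String) : String :=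
  if PySem.Str.isIn " " string then
    PySem.Str.join " "
      ((PySem.Str.split₀ string).map (fun word => String.ofList (pvCsort word.toList)))
  else
    String.ofList (pvCsort string.toList)

-- ===== PRECONDITION & SPEC =====
def Spec_rearrange_order (string : String) (out : String) : Prop := out = rearrange_order_alt string
instance (string : String) (out : String) : Decidable (Spec_rearrange_order string out) := by unfold Spec_rearrange_order; infer_instance

-- ===== CLAIM (what is proved, stated in full; the proofs are below) =====
def Claim_equal_rearrange_order : Prop := ∀ (string : String), Dom_rearrange_order string → Spec_rearrange_order string (rearrange_order string)

-- ===== LEMMAS AND PROOFS =====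

theorem pv_toNat_ofNat_small (k : Nat) (h : k < 128) : (Char.ofNat k).toNat = k := by
  rw [Char.toNat_ofNat, if_pos]
  exact Or.inl (by omega)

theorem pv_char_eq_ofNat_iff (a : Char) (k : Nat) (hk : k < 128) :
    (a = Char.ofNat k) ↔ a.toNat = k := by
  constructor
  · rintro rfl; exact pv_toNat_ofNat_small k hk
  · intro h
    apply Char.ext
    apply UInt32.toNat_inj.mp
    show a.toNat = (Char.ofNat k).toNat
    rw [pv_toNat_ofNat_small k hk]; exact h

theorem pv_foldl_append_map (f : String → String) :
    ∀ (l : List String) (acc : List String),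
      l.foldl (fun a w => a ++ [f w]) acc = acc ++ l.map f := by
  intro l
  induction l with
  | nil => intro acc; simp
  | cons w rest ih => intro acc; simp [List.foldl, ih]

-- the tallying fold computes exact character counts (all indices below 128)
theorem pv_counts_getD :
    ∀ (cs : List Char) (cnts : List Nat), cnts.length = 128 →
      (∀ c ∈ cs, c.toNat < 128) → ∀ k, k < 128 →
      (cs.foldl (fun cnts ch => cnts.set ch.toNat (cnts.getD ch.toNat 0 + 1)) cnts).getD k 0
        = cnts.getD k 0 + cs.count (Char.ofNat k) := by
  intro cs
  induction cs with
  | nil => intro cnts _ _ k _; simp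
  | cons ch rest ih =>
    intro cnts hlen hall k hk
    have hch : ch.toNat < 128 := hall ch (by simp)
    have hlen' : (cnts.set ch.toNat (cnts.getD ch.toNat 0 + 1)).length = 128 := by
      simp [hlen]
    have hall' : ∀ c ∈ rest, c.toNat < 128 := fun c hc => hall c (by simp [hc])
    simp only [List.foldl_cons]
    rw [ih _ hlen' hall' k hk]
    have hcount : (ch :: rest).count (Char.ofNat k)
        = rest.count (Char.ofNat k) + (if ch == Char.ofNat k then 1 else 0) := by
      simp [List.count_cons]
    rw [hcount]
    have hset : (cnts.set ch.toNat (cnts.getD ch.toNat 0 + 1)).getD k 0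
        = if ch.toNat = k then cnts.getD k 0 + 1 else cnts.getD k 0 := by
      simp only [List.getD_eq_getElem?_getD, List.getElem?_set]
      by_cases h : ch.toNat = k
      · simp [h, hlen, hk]
      · simp [h]
    rw [hset]
    by_cases h : ch.toNat = k
    · have : (ch == Char.ofNat k) = true := by
        simp only [beq_iff_eq]
        exact (pv_char_eq_ofNat_iff ch k hk).mpr h
      simp [h, this]; omega
    · have : (ch == Char.ofNat k) = false := by
        simp only [beq_eq_false_iff_ne, ne_eq]
        intro hc; exact h ((pv_char_eq_ofNat_iff ch k hk).mp hc)
      simp [h, this]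

theorem pv_sum_map_single :
    ∀ (n m : Nat) (f : Nat → Nat), m < n → (∀ k, k < n → k ≠ m → f k = 0) →
      ((List.range n).map f).sum = f m := by
  intro n
  induction n with
  | zero => intro m f h; omega
  | succ n ih =>
    intro m f hm hz
    rw [List.range_succ]
    simp only [List.map_append, List.sum_append, List.map_cons, List.map_nil,
      List.sum_cons, List.sum_nil]
    by_cases h : m = n
    · subst h
      have : ((List.range m).map f).sum = 0 := by
        apply List.sum_eq_zero
        intro x hx
        simp only [List.mem_map, List.mem_range] at hx
        obtain ⟨k, hk, rfl⟩ := hx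
        exact hz k (by omega) (by omega)
      omega
    · have := ih m f (by omega) (fun k hk hkm => hz k (by omega) hkm)
      rw [hz n (by omega) (fun hc => h hc.symm)]
      omega

-- the counting-sort block form of an ASCII word is exactly Python's sorted()
theorem pv_sorted_eq_blocks (cs : List Char) (h : ∀ c ∈ cs, c.toNat < 128) :
    PySem.List.sorted cs (fun c => c)
      = (List.range 128).flatMap (fun k => List.replicate (cs.count (Char.ofNat k)) (Char.ofNat k)) := by
  apply PySem.List.sorted_id_eq_of_perm_of_pairwise
  · -- permutation: both sides have the same character counts
    rw [List.perm_iff_count]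
    intro a
    rw [List.flatMap_def, List.count_flatten, List.map_map]
    have hterm : ∀ k, k < 128 →
        (List.count a ∘ fun k => List.replicate (cs.count (Char.ofNat k)) (Char.ofNat k)) k
          = if a.toNat = k then cs.count a else 0 := by
      intro k hk
      simp only [Function.comp_apply, List.count_replicate, beq_iff_eq]
      by_cases h1 : Char.ofNat k = a
      · have h2 : a.toNat = k := (pv_char_eq_ofNat_iff a k hk).mp h1.symm
        simp [h1, h2]
      · have h2 : ¬ a.toNat = k := fun hc =>
          h1 (((pv_char_eq_ofNat_iff a k hk).mpr hc).symm)
        simp [h1, h2]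
    by_cases ha : a.toNat < 128
    · rw [pv_sum_map_single 128 a.toNat _ ha
        (fun k hk hkm => by rw [hterm k hk, if_neg (fun hc => hkm hc.symm)])]
      rw [hterm a.toNat ha]
      simp
    · have hsum : ((List.range 128).map
          (List.count a ∘ fun k => List.replicate (cs.count (Char.ofNat k)) (Char.ofNat k))).sum = 0 := by
        apply List.sum_eq_zero
        intro x hx
        simp only [List.mem_map, List.mem_range] at hx
        obtain ⟨k, hk, rfl⟩ := hx
        rw [hterm k hk, if_neg (fun hc => ha (lt_of_eq_of_lt hc hk))]
      rw [hsum]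
      symm
      rw [List.count_eq_zero]
      intro hma
      exact ha (h a hma)
  · -- sortedness: blocks of equal characters in increasing code order
    rw [List.flatMap_def, List.pairwise_flatten]
    constructor
    · intro l hl
      simp only [List.mem_map, List.mem_range] at hl
      obtain ⟨k, _, rfl⟩ := hl
      rw [List.pairwise_replicate]
      exact Or.inr le_rfl
    · rw [List.pairwise_map]
      have hpr : (List.range 128).Pairwise (fun j k => j < 128 ∧ k < 128 ∧ j < k) := by
        rw [List.pairwise_iff_getElem]
        intro i j hi hj hij
        simp only [List.length_range] at hi hj
        simp only [List.getElem_range]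
        exact ⟨by omega, by omega, hij⟩
      apply hpr.imp
      intro j k ⟨hj, hk, hjk⟩ x hx y hy
      rw [List.eq_of_mem_replicate hx, List.eq_of_mem_replicate hy]
      apply Char.le_def.mpr
      show (Char.ofNat j).toNat ≤ (Char.ofNat k).toNat
      rw [pv_toNat_ofNat_small j hj, pv_toNat_ofNat_small k hk]
      omega

-- every character of every word produced by str.split() comes from the input string
theorem pv_split₀_go_forall (P : Char → Prop) :
    ∀ (s cur : List Char) (acc : List (List Char)),
      (∀ w ∈ acc, ∀ c ∈ w, P c) → (∀ c ∈ cur, P c) → (∀ c ∈ s, P c) →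
      ∀ w ∈ PySem.Chars.split₀.go s cur acc, ∀ c ∈ w, P c := by
  intro s
  induction s with
  | nil =>
    intro cur acc hacc hcur _
    rw [PySem.Chars.split₀.go]
    by_cases h : cur.isEmpty
    · simp only [h, if_true]
      intro w hw
      exact hacc w (List.mem_reverse.mp hw)
    · simp only [h, if_false]
      intro w hw c hc
      rcases List.mem_cons.mp (List.mem_reverse.mp hw) with hw' | hw'
      · exact hcur c (List.mem_reverse.mp (hw' ▸ hc))
      · exact hacc w hw' c hc
  | cons ch rest ih =>
    intro cur acc hacc hcur hs
    rw [PySem.Chars.split₀.go]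
    by_cases hsp : PySem.Chars.isspace ch
    · simp only [hsp, if_true]
      by_cases h : cur.isEmpty
      · simp only [h, if_true]
        exact ih [] acc hacc (by simp) (fun c hc => hs c (by simp [hc]))
      · simp only [h, if_false]
        apply ih [] (cur.reverse :: acc) _ (by simp) (fun c hc => hs c (by simp [hc]))
        intro w hw c hc
        rcases List.mem_cons.mp hw with hw' | hw'
        · exact hcur c (List.mem_reverse.mp (hw' ▸ hc))
        · exact hacc w hw' c hc
    · simp only [hsp, if_false]
      apply ih (ch :: cur) acc hacc _ (fun c hc => hs c (by simp [hc]))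
      intro c hc
      rcases List.mem_cons.mp hc with hc | hc
      · exact hc ▸ hs ch (by simp)
      · exact hcur c hc

theorem pv_dom_chars (string : String) (hDom : Dom_rearrange_order string) :
    ∀ c ∈ string.toList, c.toNat < 128 := by
  intro c hc
  have h := List.all_eq_true.mp hDom c hc
  unfold pvDomChar at h
  simp only [Bool.or_eq_true, Bool.and_eq_true, decide_eq_true_eq, beq_iff_eq] at h
  omega

theorem pv_csort_eq_word (w : List Char) (h : ∀ c ∈ w, c.toNat < 128) :
    String.ofList (PySem.List.sorted w (fun c => c)) = String.ofList (pvCsort w) := by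
  apply congrArg
  rw [pv_sorted_eq_blocks w h]
  show _ = (List.range 128).flatMap (fun c =>
    List.replicate ((w.foldl (fun cnts ch => cnts.set ch.toNat (cnts.getD ch.toNat 0 + 1))
      (List.replicate 128 0)).getD c 0) (Char.ofNat c))
  rw [List.flatMap_def, List.flatMap_def]
  congr 1
  apply List.map_congr_left
  intro k hk
  rw [pv_counts_getD w (List.replicate 128 0) (by simp) h k (List.mem_range.mp hk)]
  congr 1
  simp only [List.getD_eq_getElem?_getD, List.getElem?_replicate, List.mem_range.mp hk,
    if_pos, Option.getD_some]
  omega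

-- ===== VERDICT (by name: the statement is the Claim_ definition above) =====
theorem rearrange_order_spec : Claim_equal_rearrange_order := by
  intro string hDom
  unfold Spec_rearrange_order rearrange_order rearrange_order_alt
  have hchars := pv_dom_chars string hDom
  by_cases hsp : PySem.Str.isIn " " string
  · simp only [hsp, if_true]
    rw [pv_foldl_append_map (fun w => String.ofList (PySem.List.sorted w.toList (fun c => c)))]
    simp only [List.nil_append]
    apply congrArg
    apply List.map_congr_left
    intro w hw
    apply pv_csort_eq_word
    intro c hc
    have hwl : w.toList ∈ PySem.Chars.split₀ string.toList := by
      rw [← PySem.Str.split₀_map_toList]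
      exact List.mem_map_of_mem hw
    have := pv_split₀_go_forall (fun c => c.toNat < 128) string.toList [] []
      (by simp) (by simp) hchars
    unfold PySem.Chars.split₀ at hwl
    exact this w.toList hwl c hc
  · simp only [hsp, if_false]
    exact pv_csort_eq_word string.toList hchars
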